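-- pv_equiv track=rewrite | github.com/ChristianGunawan/Tucil1_IF2211_13519199 | src + test file/crypta.py | conv
-- ===== SOURCE A (Python) =====
-- def conv(w, camp):
--     result = 0
--     k = 1
--     balikkan = w[::-1]
--     for x in range(len(balikkan)):
--         result += camp[balikkan[x]] * k
--         k *= 10
--     return result
-- ===== SOURCE B (Python) =====
-- def conv(w, camp):
--     result = 0
--     for ch in w:
--         result = result * 10 + camp[ch]
--     return result
-- ===== Notes on version B (the rewrite author's own statement) =====
-- stated objective: simpler
-- what changed: Horner's method: iterate the characters of w left-to-right with result = result*10 + camp[ch], eliminating the string reversal and the separate power-of-10 accumulator k.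
import Mathlib
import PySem

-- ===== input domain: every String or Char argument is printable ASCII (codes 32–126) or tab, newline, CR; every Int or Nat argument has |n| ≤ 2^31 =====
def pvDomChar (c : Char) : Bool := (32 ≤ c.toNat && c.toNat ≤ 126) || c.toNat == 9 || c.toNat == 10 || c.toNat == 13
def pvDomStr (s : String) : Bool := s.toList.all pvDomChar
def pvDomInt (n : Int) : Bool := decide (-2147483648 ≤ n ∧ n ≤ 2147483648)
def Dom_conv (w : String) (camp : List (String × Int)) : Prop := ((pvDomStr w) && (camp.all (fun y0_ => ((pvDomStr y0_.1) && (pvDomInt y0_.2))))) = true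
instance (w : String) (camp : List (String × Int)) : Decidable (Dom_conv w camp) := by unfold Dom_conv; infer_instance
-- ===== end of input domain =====

-- B replaces A's reverse-and-weight-by-powers loop by Horner's left-to-right rule (simpler; same cost).

-- ===== PORT A =====
-- A: reverse w, then for x in range(len(...)): result += camp[balikkan[x]] * k; k *= 10.
def conv (w : String) (camp : List (String × Int)) : Int :=
  -- balikkan = w[::-1] is w.toList.reverse (exact: reverse slice of the string)
  ((PySem.List.pyRange 0 (w.toList.reverse.length : Int) 1).foldl
      (fun (s : Int × Int) x =>
        (s.1 + (PySem.Dict.mk camp).getD (String.mk [PySem.List.pyGetD w.toList.reverse x ' ']) 0 * s.2,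
         s.2 * 10))
      (0, 1)).1

-- ===== PORT B =====
def conv_alt (w : String) (camp : List (String × Int)) : Int :=
  w.toList.foldl (fun r c => r * 10 + (PySem.Dict.mk camp).getD (String.mk [c]) 0) 0

-- ===== PRECONDITION & SPEC =====
-- Pre_ excludes exactly the inputs where Python A raises KeyError: some character of w is not a key of camp.
def Pre_conv (w : String) (camp : List (String × Int)) : Prop :=
  (w.toList.all (fun c => (PySem.Dict.mk camp).contains (String.mk [c]))) = true
instance (w : String) (camp : List (String × Int)) : Decidable (Pre_conv w camp) := by
  unfold Pre_conv; infer_instance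
def pvWitness_conv : String × (List (String × Int)) := ("SEND", [("S", 9), ("E", 5), ("N", 6), ("D", 7)])

def Spec_conv (w : String) (camp : List (String × Int)) (out : Int) : Prop := out = conv_alt w camp
instance (w : String) (camp : List (String × Int)) (out : Int) : Decidable (Spec_conv w camp out) := by unfold Spec_conv; infer_instance

-- ===== CLAIM (what is proved, stated in full; the proofs are below) =====
def Claim_equal_conv : Prop := ∀ (w : String) (camp : List (String × Int)), Dom_conv w camp → Pre_conv w camp → Spec_conv w camp (conv w camp)

-- ===== LEMMAS AND PROOFS =====

-- Shifting the initial accumulator of a Horner fold.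
theorem horner_foldl_init (f : Char → Int) (t : List Char) :
    ∀ i : Int, t.foldl (fun a c => a * 10 + f c) i
      = i * 10 ^ t.length + t.foldl (fun a c => a * 10 + f c) 0 := by
  induction t with
  | nil => intro i; simp
  | cons c t ih =>
      intro i
      simp only [List.foldl_cons, List.length_cons]
      rw [ih (i * 10 + f c), ih (0 * 10 + f c)]
      ring

-- A's reversed weighted-sum loop equals Horner's rule.
theorem rev_weight_eq_horner (f : Char → Int) (l : List Char) :
    ∀ r k : Int, l.reverse.foldl (fun (s : Int × Int) c => (s.1 + f c * s.2, s.2 * 10)) (r, k)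
      = (r + k * l.foldl (fun a c => a * 10 + f c) 0, k * 10 ^ l.length) := by
  induction l with
  | nil => intro r k; simp
  | cons c t ih =>
      intro r k
      simp only [List.reverse_cons, List.foldl_append, ih r k, List.foldl_cons, List.length_cons]
      rw [horner_foldl_init f t (0 * 10 + f c)]
      simp only [List.foldl_nil, Prod.mk.injEq]
      constructor <;> ring

-- ===== VERDICT (by name: the statement is the Claim_ definition above) =====
theorem conv_spec : Claim_equal_conv := by
  intro w camp _ _
  unfold Spec_conv conv conv_alt
  rw [PySem.List.foldl_pyRange_zero_pyGetD' w.toList.reverse ' '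
        (fun (s : Int × Int) c => (s.1 + (PySem.Dict.mk camp).getD (String.mk [c]) 0 * s.2, s.2 * 10))
        (0, 1)]
  rw [rev_weight_eq_horner (fun c => (PySem.Dict.mk camp).getD (String.mk [c]) 0) w.toList 0 1]
  simp
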